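-- pv_equiv track=rewrite | github.com/lilsweetcaligula/Online-Judges | hackerrank/algorithms/implementation/easy/repeated_string/py/solution.py | repeated
-- ===== SOURCE A (Python) =====
-- def repeated(s, n, c='a'):
--     lookup = [0] * len(s)
--     curcnt = 0
--
--     for index, char in enumerate(s):
--         if char == c:
--             curcnt += 1
--
--         lookup[index] = curcnt
--
--     if n % len(s) == 0:
--         return n // len(s) * curcnt
--
--     return n // len(s) * curcnt + lookup[n - len(s) * (n // len(s)) - 1]
-- ===== SOURCE B (Python) =====
-- def repeated(s, n, c='a'):
--     L = len(s)
--     return sum((n - i + L - 1) // L for i, ch in enumerate(s) if ch == c)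
-- ===== Notes on version B (the rewrite author's own statement) =====
-- stated objective: alternative
-- what changed: Instead of A's quotient-times-total plus prefix-table lookup, B sums a per-occurrence ceiling-division: each position i of s holding c contributes ceil((n-i)/len(s)) copies, so the answer is one sum over the occurrence positions with no prefix table, no quotient/remainder split and no branch.
import Mathlib
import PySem

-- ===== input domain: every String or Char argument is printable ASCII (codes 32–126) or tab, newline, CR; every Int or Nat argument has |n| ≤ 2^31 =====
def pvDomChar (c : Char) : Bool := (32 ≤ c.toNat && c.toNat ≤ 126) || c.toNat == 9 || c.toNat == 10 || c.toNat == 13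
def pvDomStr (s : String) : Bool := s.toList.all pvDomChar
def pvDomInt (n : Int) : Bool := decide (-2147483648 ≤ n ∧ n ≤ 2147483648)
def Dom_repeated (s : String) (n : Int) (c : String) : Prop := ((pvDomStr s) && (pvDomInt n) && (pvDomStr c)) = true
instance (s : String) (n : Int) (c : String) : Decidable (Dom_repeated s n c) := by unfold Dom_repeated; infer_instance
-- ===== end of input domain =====

-- B replaces A's prefix-count table + quotient split by a single per-occurrence ceiling-division sum (alternative algorithm, same cost).


-- ===== PORT A =====
-- Literal port of A: the loop writes lookup[index] := curcnt in index order, so the final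
-- lookup list is modelled by appending each written value in turn; curcnt is threaded alongside.
def repeated (s : String) (n : Int) (c : String) : Int :=
  let chars := s.toList
  let len : Int := (chars.length : Int)
  let st := chars.foldl
    (fun (st : List Int × Int) ch =>
      let cur := if String.mk [ch] == c then st.2 + 1 else st.2
      (st.1 ++ [cur], cur)) ([], 0)
  let lookup := st.1
  let curcnt := st.2
  if PySem.Int.mod n len = 0 then
    PySem.Int.floordiv n len * curcnt
  else
    -- the index n - len*(n//len) - 1 equals n%len - 1 and is always in range when s ≠ "",
    -- so the default of pyGetD is never used under Pre_
    PySem.Int.floordiv n len * curcnt +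
      PySem.List.pyGetD lookup (n - len * PySem.Int.floordiv n len - 1) 0

-- ===== PORT B =====
-- B: one fold over enumerate(s); each occurrence of c at index i contributes (n - i + L - 1) // L.
def repeated_alt (s : String) (n : Int) (c : String) : Int :=
  let L : Int := (s.toList.length : Int)
  (PySem.List.enumerate s.toList 0).foldl
    (fun acc p =>
      if String.mk [p.2] == c then acc + PySem.Int.floordiv (n - p.1 + L - 1) L else acc) 0

-- ===== PRECONDITION & SPEC =====
-- Pre_ excludes exactly s = "", where A raises ZeroDivisionError (n % 0).
def Pre_repeated (s : String) (n : Int) (c : String) : Prop := s ≠ ""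
instance (s : String) (n : Int) (c : String) : Decidable (Pre_repeated s n c) := by unfold Pre_repeated; infer_instance
def pvWitness_repeated : String × Int × String := ("abcab", 12, "a")

def Spec_repeated (s : String) (n : Int) (c : String) (out : Int) : Prop := out = repeated_alt s n c
instance (s : String) (n : Int) (c : String) (out : Int) : Decidable (Spec_repeated s n c out) := by unfold Spec_repeated; infer_instance

-- ===== CLAIM =====
def Claim_equal_repeated : Prop := ∀ (s : String) (n : Int) (c : String), Dom_repeated s n c → Pre_repeated s n c → Spec_repeated s n c (repeated s n c)

-- ===== LEMMAS AND PROOFS =====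

-- the cumulative prefix-count list A's loop builds, starting from running count k
def prefC (p : Char → Bool) : Int → List Char → List Int
  | _, [] => []
  | k, x :: xs => (k + (if p x then 1 else 0)) :: prefC p (k + (if p x then 1 else 0)) xs

theorem fold_eq (c : String) (l : List Char) : ∀ (acc : List Int) (k : Int),
    l.foldl (fun (st : List Int × Int) ch =>
        let cur := if String.mk [ch] == c then st.2 + 1 else st.2
        (st.1 ++ [cur], cur)) (acc, k)
      = (acc ++ prefC (fun ch => String.mk [ch] == c) k l,
         k + (l.countP (fun ch => String.mk [ch] == c) : Int)) := by
  induction l with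
  | nil => intro acc k; simp [prefC]
  | cons x xs ih =>
    intro acc k
    simp only [List.foldl_cons, List.countP_cons, prefC]
    rw [ih]
    by_cases h : (String.mk [x] == c) = true
    · refine Prod.ext ?_ ?_
      · simp [h, List.append_assoc]
      · simp only [h, if_true]; push_cast; ring
    · refine Prod.ext ?_ ?_
      · simp [h, List.append_assoc]
      · simp [h]

theorem length_prefC (p : Char → Bool) (l : List Char) : ∀ k, (prefC p k l).length = l.length := by
  induction l with
  | nil => intro k; simp [prefC]
  | cons x xs ih => intro k; simp [prefC, ih]

theorem getElem_prefC (p : Char → Bool) (l : List Char) : ∀ (k : Int) (j : Nat) (h : j < l.length),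
    (prefC p k l)[j]'(by rw [length_prefC]; exact h) = k + ((l.take (j + 1)).countP p : Int) := by
  induction l with
  | nil => intro k j h; simp at h
  | cons x xs ih =>
    intro k j h
    cases j with
    | zero => by_cases hx : p x <;> simp [prefC, hx]
    | succ j =>
      have hj : j < xs.length := by simpa using h
      simp only [prefC, List.getElem_cons_succ, List.take_succ_cons, List.countP_cons]
      rw [ih _ j hj]
      by_cases hx : p x
      · simp only [hx, if_true]; push_cast; ring
      · simp [hx]

-- B's fold: over a suffix l starting at absolute index j, it adds q per match plus 1 per match below index r.
theorem foldB_eq (p : Char → Bool) (L q r n : Int) (hL : 0 < L) (hr0 : 0 ≤ r) (hrlt : r < L)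
    (hqr : q * L + r = n) :
    ∀ (l : List Char) (j : Nat) (acc : Int), (j : Int) + l.length ≤ L →
      (PySem.List.enumerate l (j : Int)).foldl
        (fun acc pr => if p pr.2 then acc + PySem.Int.floordiv (n - pr.1 + L - 1) L else acc) acc
      = acc + q * (l.countP p : Int) + ((l.take (r.toNat - j)).countP p : Int) := by
  intro l
  induction l with
  | nil => intro j acc _; simp [PySem.List.enumerate_nil]
  | cons x xs ih =>
    intro j acc hle
    have hlen : ((j : Int) + 1) + xs.length ≤ L := by
      simp only [List.length_cons] at hle; push_cast at hle ⊢; omega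
    have hdj : PySem.Int.floordiv (n - (j : Int) + L - 1) L
        = q + (if (j : Int) < r then 1 else 0) := by
      rw [PySem.Int.floordiv_eq_iff_of_pos hL]
      have hjL : (j : Int) < L := by simp only [List.length_cons] at hle; push_cast at hle; omega
      by_cases hjr : (j : Int) < r
      · simp only [hjr, if_true]
        constructor <;> nlinarith
      · simp only [hjr, if_false]
        constructor <;> nlinarith
    rw [PySem.List.enumerate_cons, List.foldl_cons]
    have hcast : (j : Int) + 1 = ((j + 1 : Nat) : Int) := by push_cast; ring
    by_cases hx : p x
    · simp only [hx, if_true, hdj]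
      rw [hcast, ih (j + 1) _ hlen]
      simp only [List.countP_cons, hx, if_true]
      by_cases hjr : (j : Int) < r
      · have ht : r.toNat - j = (r.toNat - (j + 1)) + 1 := by omega
        rw [ht, List.take_succ_cons]
        simp only [List.countP_cons, hx, if_true, hjr]
        push_cast; ring
      · have ht1 : r.toNat - j = 0 := by omega
        have ht2 : r.toNat - (j + 1) = 0 := by omega
        simp only [ht1, ht2, List.take_zero, hjr, if_false]
        push_cast; ring
    · simp only [hx, if_false]
      rw [hcast, ih (j + 1) _ hlen]
      simp only [List.countP_cons, hx, if_false]
      by_cases hjr : (j : Int) < r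
      · have ht : r.toNat - j = (r.toNat - (j + 1)) + 1 := by omega
        rw [ht, List.take_succ_cons]
        simp [List.countP_cons, hx]
      · have ht1 : r.toNat - j = 0 := by omega
        have ht2 : r.toNat - (j + 1) = 0 := by omega
        simp [ht1, ht2]

-- ===== VERDICT =====
theorem repeated_spec : Claim_equal_repeated := by
  intro s n c _ hpre
  unfold Spec_repeated repeated repeated_alt
  dsimp only
  have hne : s.toList ≠ [] := by
    intro h; exact hpre (String.toList_inj.mp (by simpa using h))
  have hlen : 0 < (s.toList.length : Int) := by
    have := List.length_pos_iff.mpr hne; exact_mod_cast this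
  rw [fold_eq c s.toList [] 0]
  simp only [List.nil_append, zero_add]
  set len : Int := (s.toList.length : Int) with hlendef
  set q := PySem.Int.floordiv n len with hq
  set r := PySem.Int.mod n len with hr
  have hqr : q * len + r = n := PySem.Int.floordiv_mul_add_mod n len
  have hr0 : 0 ≤ r := PySem.Int.mod_nonneg n hlen
  have hrlt : r < len := PySem.Int.mod_lt n hlen
  have hB := foldB_eq (fun ch => String.mk [ch] == c) len q r n hlen hr0 hrlt hqr
      s.toList 0 0 (by simp [hlendef])
  rw [show ((0 : Nat) : Int) = 0 by norm_num] at hB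
  rw [hB]
  simp only [zero_add, Nat.sub_zero]
  by_cases h0 : r = 0
  · rw [if_pos h0]
    simp [h0]
  · have hidx : n - len * q - 1 = r - 1 := by
      have hc : len * q = q * len := mul_comm _ _
      omega
    rw [if_neg h0, hidx]
    have hlenpref : (prefC (fun ch => String.mk [ch] == c) 0 s.toList).length = s.toList.length :=
      length_prefC _ _ 0
    rw [PySem.List.pyGetD_eq_getElem _ 0 (by omega)
      (by rw [hlenpref]; omega)]
    rw [getElem_prefC _ _ 0 (r - 1).toNat (by omega)]
    have ht : (r - 1).toNat + 1 = r.toNat := by omega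
    rw [ht]
    ring
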